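-- pv_equiv track=rewrite | github.com/luxurahair/calcauto-final | backend/utils/fca_helpers.py | merge_multiline_names
-- ===== SOURCE A (Python) =====
-- from typing import Any, Dict, List, Optional, Tuple
--
-- def merge_multiline_names(raw_names: List[Tuple[int, str]]) -> List[Tuple[int, str]]:
--     """
--     Fusionne les noms de vehicules qui sont splites sur 2 lignes du PDF.
--     Ex: ligne 1 = "Grand Cherokee L (excludes Laredo"
--         ligne 2 = "(WLJH75 2*A & 2*B) and Overland (WLJS75))"
--     -> fusionne en une seule entree.
--     """
--     if not raw_names:
--         return []
--     merged = []
--     for ri, name in raw_names: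
--         # Si la ligne commence par ( ou est tres courte ET qu'on a un precedent
--         if merged and (
--             name.startswith('(') or
--             name.startswith(')') or
--             (len(name) < 20 and not any(kw in name for kw in ['Ram', 'Jeep', 'Dodge', 'Chrysler', 'Fiat', 'Grand', 'Wrangler', 'Compass', 'Cherokee', 'Charger', 'Durango', 'Hornet', 'Gladiator', 'Pacifica', 'Wagoneer', 'ProMaster', '500e', 'Daytona', 'Caravan']))
--         ):
--             prev_ri, prev_name = merged[-1]
--             merged[-1] = (prev_ri, f"{prev_name} {name}")
--         else:
--             merged.append((ri, name))
--     return merged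
-- ===== SOURCE B (Python) =====
-- from typing import List, Tuple
--
-- _KEYWORDS = ['Ram', 'Jeep', 'Dodge', 'Chrysler', 'Fiat', 'Grand', 'Wrangler', 'Compass',
--              'Cherokee', 'Charger', 'Durango', 'Hornet', 'Gladiator', 'Pacifica', 'Wagoneer',
--              'ProMaster', '500e', 'Daytona', 'Caravan']
--
--
-- def _is_continuation(name: str) -> bool:
--     return (name.startswith('(') or name.startswith(')')
--             or (len(name) < 20 and not any(kw in name for kw in _KEYWORDS)))
--
--
-- def merge_multiline_names(raw_names: List[Tuple[int, str]]) -> List[Tuple[int, str]]: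
--     # First pass: group lines; a continuation line joins the open group.
--     groups = []
--     current = []
--     for ri, name in raw_names:
--         if current and _is_continuation(name):
--             current.append((ri, name))
--         else:
--             if current:
--                 groups.append(current)
--             current = [(ri, name)]
--     if current:
--         groups.append(current)
--     # Second pass: one entry per group, names space-joined.
--     return [(g[0][0], ' '.join(n for _, n in g)) for g in groups]
-- ===== Notes on version B (the rewrite author's own statement) =====
-- stated objective: alternative
-- what changed: B separates classification from aggregation: a named is_continuation predicate, a first pass building groups of (row, name) lines, and a second pass that joins each group with ' '.join, instead of A's single loop that rewrites the last merged entry with f-string concatenation.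
import Mathlib
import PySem

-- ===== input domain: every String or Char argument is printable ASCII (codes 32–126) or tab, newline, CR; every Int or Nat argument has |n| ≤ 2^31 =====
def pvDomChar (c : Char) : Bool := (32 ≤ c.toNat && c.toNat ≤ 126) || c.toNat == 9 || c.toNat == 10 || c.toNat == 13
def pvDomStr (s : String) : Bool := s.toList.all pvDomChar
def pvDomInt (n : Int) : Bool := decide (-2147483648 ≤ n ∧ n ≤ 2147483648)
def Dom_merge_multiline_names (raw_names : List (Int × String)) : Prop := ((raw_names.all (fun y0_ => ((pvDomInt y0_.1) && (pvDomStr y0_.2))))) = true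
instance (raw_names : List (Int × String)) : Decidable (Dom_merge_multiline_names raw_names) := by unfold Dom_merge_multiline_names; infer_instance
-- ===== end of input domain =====

-- B restructures A's single rewriting loop into classify (is_continuation) + group + join passes; same output.

-- ===== PORT A =====
def mmnKeywords : List String :=
  ["Ram", "Jeep", "Dodge", "Chrysler", "Fiat", "Grand", "Wrangler", "Compass",
   "Cherokee", "Charger", "Durango", "Hornet", "Gladiator", "Pacifica", "Wagoneer",
   "ProMaster", "500e", "Daytona", "Caravan"]

def merge_multiline_names (raw_names : List (Int × String)) : List (Int × String) :=
  if raw_names = [] then []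
  else
    raw_names.foldl (fun merged p =>
      if merged ≠ [] ∧
          (PySem.Str.startswith p.2 "(" = true ∨ PySem.Str.startswith p.2 ")" = true ∨
            (PySem.Str.len p.2 < 20 ∧
              ¬ (mmnKeywords.any (fun kw => PySem.Str.isIn kw p.2)) = true)) then
        match merged.getLast? with
        | some (prev_ri, prev_name) =>
            merged.dropLast ++ [(prev_ri, PySem.Str.join " " [prev_name, p.2])]
        | none => merged
      else merged ++ [p]) []

-- ===== PORT B =====
def mmnIsContinuation (name : String) : Bool :=
  PySem.Str.startswith name "(" || PySem.Str.startswith name ")" ||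
    (decide (PySem.Str.len name < 20) && !(mmnKeywords.any (fun kw => PySem.Str.isIn kw name)))

def mmnFinish (g : List (Int × String)) : Int × String :=
  ((g.headD (0, "")).1, PySem.Str.join " " (g.map Prod.snd))

def merge_multiline_names_alt (raw_names : List (Int × String)) : List (Int × String) :=
  let st :=
    raw_names.foldl
      (fun (st : List (List (Int × String)) × List (Int × String)) p =>
        if st.2 ≠ [] ∧ mmnIsContinuation p.2 = true then (st.1, st.2 ++ [p])
        else ((if st.2 = [] then st.1 else st.1 ++ [st.2]), [p]))
      ([], [])
  ((if st.2 = [] then st.1 else st.1 ++ [st.2]).map mmnFinish)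

-- ===== PRECONDITION & SPEC =====
def Spec_merge_multiline_names (raw_names : List (Int × String)) (out : List (Int × String)) : Prop := out = merge_multiline_names_alt raw_names
instance (raw_names : List (Int × String)) (out : List (Int × String)) : Decidable (Spec_merge_multiline_names raw_names out) := by unfold Spec_merge_multiline_names; infer_instance

-- ===== CLAIM (what is proved, stated in full; the proofs are below) =====
def Claim_equal_merge_multiline_names : Prop := ∀ (raw_names : List (Int × String)), Dom_merge_multiline_names raw_names → Spec_merge_multiline_names raw_names (merge_multiline_names raw_names)

-- ===== LEMMAS AND PROOFS =====

-- named copies of the two fold bodies (definitionally equal to the lambdas in the ports)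
def mmnStepA (merged : List (Int × String)) (p : Int × String) : List (Int × String) :=
  if merged ≠ [] ∧
      (PySem.Str.startswith p.2 "(" = true ∨ PySem.Str.startswith p.2 ")" = true ∨
        (PySem.Str.len p.2 < 20 ∧
          ¬ (mmnKeywords.any (fun kw => PySem.Str.isIn kw p.2)) = true)) then
    match merged.getLast? with
    | some (prev_ri, prev_name) =>
        merged.dropLast ++ [(prev_ri, PySem.Str.join " " [prev_name, p.2])]
    | none => merged
  else merged ++ [p]

def mmnStepB (st : List (List (Int × String)) × List (Int × String)) (p : Int × String) :
    List (List (Int × String)) × List (Int × String) :=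
  if st.2 ≠ [] ∧ mmnIsContinuation p.2 = true then (st.1, st.2 ++ [p])
  else ((if st.2 = [] then st.1 else st.1 ++ [st.2]), [p])

theorem mmn_cond_iff (p : Int × String) :
    (PySem.Str.startswith p.2 "(" = true ∨ PySem.Str.startswith p.2 ")" = true ∨
      (PySem.Str.len p.2 < 20 ∧
        ¬ (mmnKeywords.any (fun kw => PySem.Str.isIn kw p.2)) = true))
    ↔ mmnIsContinuation p.2 = true := by
  simp only [mmnIsContinuation, Bool.or_eq_true, Bool.and_eq_true, decide_eq_true_eq,
    Bool.not_eq_true', or_assoc, Bool.not_eq_true]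

theorem mmn_chars_join_snoc (sep : List Char) (xs : List (List Char)) (hx : xs ≠ []) (y : List Char) :
    PySem.Chars.join sep (xs ++ [y]) = PySem.Chars.join sep xs ++ sep ++ y := by
  induction xs with
  | nil => cases hx rfl
  | cons a t ih =>
    cases t with
    | nil => simp [PySem.Chars.join_cons_cons, PySem.Chars.join_singleton]
    | cons b u =>
      have h := ih (by simp)
      simp only [List.cons_append] at h ⊢
      rw [PySem.Chars.join_cons_cons, PySem.Chars.join_cons_cons, h]
      simp

theorem mmn_join_snoc (xs : List String) (hx : xs ≠ []) (y : String) :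
    PySem.Str.join " " (xs ++ [y]) = PySem.Str.join " " [PySem.Str.join " " xs, y] := by
  apply String.toList_inj.mp
  rw [PySem.Str.toList_join, PySem.Str.toList_join]
  simp only [List.map_append, List.map_cons, List.map_nil, PySem.Str.toList_join]
  rw [PySem.Chars.join_cons_cons, PySem.Chars.join_singleton,
    mmn_chars_join_snoc _ _ (by simpa using hx) _]

theorem mmn_join_one (y : String) : PySem.Str.join " " [y] = y := by
  apply String.toList_inj.mp
  rw [PySem.Str.toList_join]
  simp [PySem.Chars.join_singleton]

theorem mmn_finish_one (p : Int × String) : mmnFinish [p] = p := by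
  unfold mmnFinish
  simp [mmn_join_one]

theorem mmn_finish_snoc (current : List (Int × String)) (h : current ≠ []) (p : Int × String) :
    mmnFinish (current ++ [p])
      = ((mmnFinish current).1, PySem.Str.join " " [(mmnFinish current).2, p.2]) := by
  cases current with
  | nil => cases h rfl
  | cons a t =>
    unfold mmnFinish
    simp only [List.cons_append, List.headD_cons, List.map_cons, List.map_append, List.map_nil]
    rw [← List.map_cons, ← List.cons_append, ← List.map_cons,
      mmn_join_snoc _ (by simp) p.2]

theorem mmnStepA_cont (groups : List (List (Int × String))) (current : List (Int × String))
    (hcur : current ≠ []) (p : Int × String) (hc : mmnIsContinuation p.2 = true) :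
    mmnStepA ((groups ++ [current]).map mmnFinish) p
      = (groups ++ [current ++ [p]]).map mmnFinish := by
  unfold mmnStepA
  rw [if_pos ⟨by simp, (mmn_cond_iff p).mpr hc⟩]
  have hlast : ((groups ++ [current]).map mmnFinish).getLast? = some (mmnFinish current) := by
    simp
  rw [hlast]
  have hdrop : ((groups ++ [current]).map mmnFinish).dropLast = groups.map mmnFinish := by
    simp
  rw [hdrop]
  have hsnoc := mmn_finish_snoc current hcur p
  rcases hm : mmnFinish current with ⟨r, s⟩
  rw [hm] at hsnoc
  simp [hsnoc]

theorem mmnStepA_new (merged : List (Int × String)) (p : Int × String)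
    (h : ¬ (merged ≠ [] ∧ mmnIsContinuation p.2 = true)) :
    mmnStepA merged p = merged ++ [p] := by
  unfold mmnStepA
  rw [if_neg (fun hh => h ⟨hh.1, (mmn_cond_iff p).mp hh.2⟩)]

theorem mmn_invariant (l : List (Int × String))
    (groups : List (List (Int × String))) (current : List (Int × String))
    (hcg : current = [] → groups = []) :
    (l.foldl mmnStepA ((if current = [] then groups else groups ++ [current]).map mmnFinish))
    = (let st := l.foldl mmnStepB (groups, current)
       ((if st.2 = [] then st.1 else st.1 ++ [st.2]).map mmnFinish)) := by
  induction l generalizing groups current with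
  | nil => rfl
  | cons p l ih =>
    simp only [List.foldl_cons]
    by_cases hcur : current = []
    · have hg := hcg hcur
      subst hcur hg
      have hB : mmnStepB ([], []) p = ([], [p]) := by
        unfold mmnStepB
        rw [if_neg (by simp)]
        rfl
      have hA : mmnStepA ((if ([] : List (Int × String)) = [] then ([] : List (List (Int × String))) else [] ++ [[]]).map mmnFinish) p
          = (if ([p] : List (Int × String)) = [] then ([] : List (List (Int × String))) else [] ++ [[p]]).map mmnFinish := by
        rw [if_pos rfl, if_neg (by simp)]
        rw [mmnStepA_new _ _ (by simp)]
        simp [mmn_finish_one]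
      rw [hA, hB]
      exact ih [] [p] (by simp)
    · rw [if_neg hcur]
      by_cases hc : mmnIsContinuation p.2 = true
      · have hB : mmnStepB (groups, current) p = (groups, current ++ [p]) := by
          unfold mmnStepB
          rw [if_pos ⟨hcur, hc⟩]
        rw [hB, mmnStepA_cont groups current hcur p hc]
        have h := ih groups (current ++ [p]) (by simp)
        rw [if_neg (by simp)] at h
        exact h
      · have hB : mmnStepB (groups, current) p = (groups ++ [current], [p]) := by
          unfold mmnStepB
          rw [if_neg (fun hh => hc hh.2), if_neg hcur]
        rw [hB, mmnStepA_new _ _ (fun hh => hc hh.2)]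
        have h := ih (groups ++ [current]) [p] (by simp)
        rw [if_neg (by simp)] at h
        rw [← h]
        simp [mmn_finish_one]

-- ===== VERDICT (by name: the statement is the Claim_ definition above) =====
theorem merge_multiline_names_spec : Claim_equal_merge_multiline_names := by
  intro raw _
  unfold Spec_merge_multiline_names merge_multiline_names merge_multiline_names_alt
  split
  · subst raw; rfl
  · exact mmn_invariant raw [] [] (fun _ => rfl)
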